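-- pv_equiv track=rewrite | github.com/andreasvc/adventofcode | 2016/adventofcode.py | day8
-- ===== SOURCE A (Python) =====
-- def day8(s):
-- 	# rowlen, numrows = 7, 3
-- 	rowlen, numrows = 50, 6
-- 	r = [[' ' for _ in range(rowlen)] for _ in range(numrows)]
-- 	for line in s.splitlines():
-- 		if line.startswith('rect'):
-- 			_, ab = line.split()
-- 			a, b = ab.split('x')
-- 			for n in range(int(a)):
-- 				for m in range(int(b)):
-- 					r[m][n] = '#'
-- 		elif line.startswith('rotate row'):
-- 			_, _, a, _, b = line.split()
-- 			y, b = int(a.split('=')[1]), int(b)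
-- 			r[y] = [r[y][(n - b) % rowlen] for n in range(rowlen)]
-- 		elif line.startswith('rotate column'):
-- 			_, _, a, _, b = line.split()
-- 			x, b = int(a.split('=')[1]), int(b)
-- 			newcol = [r[(y - b) % numrows][x] for y in range(numrows)]
-- 			for y in range(numrows):
-- 				r[y][x] = newcol[y]
-- 	result = '\n'.join(''.join(line) for line in r)
-- 	return '%s\n%s' % (result.count('#'), result)
-- ===== SOURCE B (Python) =====
-- def _parse(line):
-- 	# One place that turns a line into ('rect'|'row'|'col', u, v), or None to skip it.
-- 	if line.startswith('rect'):
-- 		_, ab = line.split()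
-- 		a, b = ab.split('x')
-- 		return ('rect', int(a), int(b))
-- 	if line.startswith('rotate row'):
-- 		_, _, a, _, b = line.split()
-- 		return ('row', int(a.split('=')[1]), int(b))
-- 	if line.startswith('rotate column'):
-- 		_, _, a, _, b = line.split()
-- 		return ('col', int(a.split('=')[1]), int(b))
-- 	return None
--
--
-- def day8(s):
-- 	# Rows kept as immutable strings; rect is one per-cell comprehension, a row
-- 	# rotation is slicing, a column rotation transposes with zip, rotates one
-- 	# row of the transpose by slicing, and transposes back.
-- 	rowlen, numrows = 50, 6
-- 	rows = [' ' * rowlen] * numrows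
-- 	for line in s.splitlines():
-- 		op = _parse(line)
-- 		if op is None:
-- 			continue
-- 		kind, u, v = op
-- 		if kind == 'rect':
-- 			rows = [''.join('#' if x < u and y < v else c for x, c in enumerate(row))
-- 			        for y, row in enumerate(rows)]
-- 		elif kind == 'row':
-- 			k = -v % rowlen
-- 			rows[u] = rows[u][k:] + rows[u][:k]
-- 		else:
-- 			k = -v % numrows
-- 			cols = [''.join(col) for col in zip(*rows)]
-- 			cols[u] = cols[u][k:] + cols[u][:k]
-- 			rows = [''.join(row) for row in zip(*cols)]
-- 	grid = '\n'.join(rows)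
-- 	return '%s\n%s' % (grid.count('#'), grid)
-- ===== Notes on version B (the rewrite author's own statement) =====
-- stated objective: idiomatic
-- what changed: The mutable 2-D list of chars updated cell-by-cell is replaced by immutable row strings: rect becomes one per-cell comprehension, a row rotation becomes string slicing, and a column rotation transposes the grid with zip(*), slices one row of the transpose, and transposes back; parsing is factored into one helper.
import Mathlib
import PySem

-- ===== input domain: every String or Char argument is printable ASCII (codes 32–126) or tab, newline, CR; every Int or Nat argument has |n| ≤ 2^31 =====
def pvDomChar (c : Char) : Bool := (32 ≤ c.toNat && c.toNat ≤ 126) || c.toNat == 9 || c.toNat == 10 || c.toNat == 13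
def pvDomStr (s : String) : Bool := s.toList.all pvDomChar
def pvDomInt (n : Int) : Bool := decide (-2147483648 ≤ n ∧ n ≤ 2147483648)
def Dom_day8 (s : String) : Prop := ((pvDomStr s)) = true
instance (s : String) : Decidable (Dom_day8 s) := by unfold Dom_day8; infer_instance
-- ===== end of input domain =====

-- B replaces the mutable 2-D char grid by immutable row strings (rect = one per-cell
-- comprehension, row rotation = slicing, column rotation = transpose/slice/transpose);
-- objective: a more idiomatic implementation, same cost.

-- ===== PORT A =====
-- one line of A's loop body: the grid update for this instruction line
def day8StepA (r : List (List Char)) (line : String) : List (List Char) :=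
  if PySem.Str.startswith line "rect" then
    match PySem.Str.split₀ line with
    | [_, ab] =>
      match PySem.Str.split? ab "x" with
      | some [p, q] =>
        match PySem.Int.ofStr? p, PySem.Int.ofStr? q with
        | some a, some b =>
          -- for n in range(int(a)): for m in range(int(b)): r[m][n] = '#'
          (PySem.List.pyRange 0 a 1).foldl (fun r n =>
            (PySem.List.pyRange 0 b 1).foldl (fun r m =>
              PySem.List.pySetD r m (PySem.List.pySetD (PySem.List.pyGetD r m []) n '#')) r) r
        | _, _ => r          -- int() raises: unreached under Pre_day8
      | _ => r               -- unpack raises: unreached under Pre_day8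
    | _ => r                 -- unpack raises: unreached under Pre_day8
  else if PySem.Str.startswith line "rotate row" then
    match PySem.Str.split₀ line with
    | [_, _, a, _, b] =>
      match (PySem.Str.split? a "=").bind (fun ps => PySem.List.pyGet? ps 1),
            PySem.Int.ofStr? b with
      | some e, some bv =>
        match PySem.Int.ofStr? e with
        | some y =>
          -- r[y] = [r[y][(n - b) % rowlen] for n in range(rowlen)]
          PySem.List.pySetD r y ((PySem.List.pyRange 0 50 1).map (fun n =>
            PySem.List.pyGetD (PySem.List.pyGetD r y []) (PySem.Int.mod (n - bv) 50) ' '))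
        | none => r
      | _, _ => r
    | _ => r
  else if PySem.Str.startswith line "rotate column" then
    match PySem.Str.split₀ line with
    | [_, _, a, _, b] =>
      match (PySem.Str.split? a "=").bind (fun ps => PySem.List.pyGet? ps 1),
            PySem.Int.ofStr? b with
      | some e, some bv =>
        match PySem.Int.ofStr? e with
        | some x =>
          -- newcol = [r[(y - b) % numrows][x] for y in range(numrows)]
          let newcol := (PySem.List.pyRange 0 6 1).map (fun y =>
            PySem.List.pyGetD (PySem.List.pyGetD r (PySem.Int.mod (y - bv) 6) []) x ' ')
          -- for y in range(numrows): r[y][x] = newcol[y]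
          (PySem.List.pyRange 0 6 1).foldl (fun r y =>
            PySem.List.pySetD r y (PySem.List.pySetD (PySem.List.pyGetD r y []) x
              (PySem.List.pyGetD newcol y ' '))) r
        | none => r
      | _, _ => r
    | _ => r
  else r

def day8 (s : String) : String :=
  let rowlen : Int := 50
  let numrows : Int := 6
  let r0 := (PySem.List.pyRange 0 numrows 1).map (fun _ =>
    (PySem.List.pyRange 0 rowlen 1).map (fun _ => ' '))
  let r := (PySem.Str.splitlines s).foldl day8StepA r0
  let result := PySem.Chars.join ['\n'] (r.map (fun row =>
    PySem.Chars.join [] (row.map (fun c => [c]))))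
  String.ofList (PySem.Int.toChars ((PySem.Chars.count result ['#'] : Int)) ++ '\n' :: result)

-- ===== PORT B =====
-- termination measure fact for pyZipStar (cited by its decreasing_by)
theorem pyZipStar_measure {α : Type} (rs : List (List α)) (h1 : rs ≠ [])
    (h2 : ¬ rs.any (·.isEmpty) = true) :
    ((rs.map (·.tail)).map List.length).sum < (rs.map List.length).sum := by
  match rs with
  | r :: rest =>
    simp only [List.any_cons, Bool.or_eq_true, not_or] at h2
    have hr : r ≠ [] := by
      intro h; exact h2.1 (by simp [h])
    have hle : ((rest.map (·.tail)).map List.length).sum ≤ (rest.map List.length).sum := by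
      simp only [List.map_map]
      exact List.sum_le_sum (fun i _ => by simp [List.length_tail])
    have hlt : r.tail.length < r.length := by
      cases r with
      | nil => exact absurd rfl hr
      | cons a l => simp
    simp only [List.map_cons, List.sum_cons]
    omega

-- zip(*rs) specialised to lists: tuples of heads while no list is exhausted
def pyZipStar {α : Type} (rs : List (List α)) : List (List α) :=
  if h : rs = [] ∨ rs.any (·.isEmpty) = true then []
  else rs.filterMap (·.head?) :: pyZipStar (rs.map (·.tail))
termination_by (rs.map List.length).sum
decreasing_by
  push Not at h
  exact pyZipStar_measure rs h.1 h.2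

-- _parse: a line as ('rect'|'row'|'col', u, v); none both for skipped lines and
-- (unreached under Pre_day8) lines whose parse raises in Python
def day8Parse (line : String) : Option (String × Int × Int) :=
  if PySem.Str.startswith line "rect" then
    match PySem.Str.split₀ line with
    | [_, ab] =>
      match PySem.Str.split? ab "x" with
      | some [p, q] =>
        match PySem.Int.ofStr? p, PySem.Int.ofStr? q with
        | some a, some b => some ("rect", a, b)
        | _, _ => none
      | _ => none
    | _ => none
  else if PySem.Str.startswith line "rotate row" then
    match PySem.Str.split₀ line with
    | [_, _, a, _, b] =>
      match (PySem.Str.split? a "=").bind (fun ps => PySem.List.pyGet? ps 1),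
            PySem.Int.ofStr? b with
      | some e, some bv =>
        match PySem.Int.ofStr? e with
        | some y => some ("row", y, bv)
        | none => none
      | _, _ => none
    | _ => none
  else if PySem.Str.startswith line "rotate column" then
    match PySem.Str.split₀ line with
    | [_, _, a, _, b] =>
      match (PySem.Str.split? a "=").bind (fun ps => PySem.List.pyGet? ps 1),
            PySem.Int.ofStr? b with
      | some e, some bv =>
        match PySem.Int.ofStr? e with
        | some x => some ("col", x, bv)
        | none => none
      | _, _ => none
    | _ => none
  else none

-- B's loop body: dispatch on the parsed instruction
def day8AltStep (rows : List (List Char)) (line : String) : List (List Char) :=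
  match day8Parse line with
  | none => rows
  | some (kind, u, v) =>
    if kind == "rect" then
      (PySem.List.enumerate rows 0).map (fun yrow =>
        PySem.Chars.join [] ((PySem.List.enumerate yrow.2 0).map (fun xc =>
          [if xc.1 < u ∧ yrow.1 < v then '#' else xc.2])))
    else if kind == "row" then
      let k := PySem.Int.mod (-v) 50
      PySem.List.pySetD rows u
        (PySem.List.slice (PySem.List.pyGetD rows u []) (some k) none ++
         PySem.List.slice (PySem.List.pyGetD rows u []) none (some k))
    else
      let k := PySem.Int.mod (-v) 6
      let cols := (pyZipStar rows).map (fun col =>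
        PySem.Chars.join [] (col.map (fun c => [c])))
      let cols' := PySem.List.pySetD cols u
        (PySem.List.slice (PySem.List.pyGetD cols u []) (some k) none ++
         PySem.List.slice (PySem.List.pyGetD cols u []) none (some k))
      (pyZipStar cols').map (fun row => PySem.Chars.join [] (row.map (fun c => [c])))

def day8_alt (s : String) : String :=
  let rows0 : List (List Char) := List.replicate 6 (List.replicate 50 ' ')
  let rows := (PySem.Str.splitlines s).foldl day8AltStep rows0
  let grid := PySem.Chars.join ['\n'] rows
  String.ofList (PySem.Int.toChars ((PySem.Chars.count grid ['#'] : Int)) ++ '\n' :: grid)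

-- ===== PRECONDITION & SPEC =====
-- Pre_day8 excludes exactly the lines on which A raises (malformed instruction lines,
-- rotate indices outside [-rows,rows), rect sizes overflowing the grid) and the
-- 'rect axb' lines with a ≤ 0 whose b is not an integer: A's lazy 'range(int(a))'
-- never evaluates int(b) there and returns, while B's eager parser raises ValueError.
def lineOK (line : String) : Bool :=
  if PySem.Str.startswith line "rect" then
    match PySem.Str.split₀ line with
    | [_, ab] =>
      match PySem.Str.split? ab "x" with
      | some [p, q] =>
        match PySem.Int.ofStr? p, PySem.Int.ofStr? q with
        | some a, some b => !(decide (1 ≤ a) && decide (1 ≤ b) && (decide (50 < a) || decide (6 < b)))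
        | _, _ => false
      | _ => false
    | _ => false
  else if PySem.Str.startswith line "rotate row" then
    match PySem.Str.split₀ line with
    | [_, _, a, _, b] =>
      match (PySem.Str.split? a "=").bind (fun ps => PySem.List.pyGet? ps 1),
            PySem.Int.ofStr? b with
      | some e, some _ =>
        match PySem.Int.ofStr? e with
        | some y => decide (-6 ≤ y ∧ y < 6)
        | none => false
      | _, _ => false
    | _ => false
  else if PySem.Str.startswith line "rotate column" then
    match PySem.Str.split₀ line with
    | [_, _, a, _, b] =>
      match (PySem.Str.split? a "=").bind (fun ps => PySem.List.pyGet? ps 1),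
            PySem.Int.ofStr? b with
      | some e, some _ =>
        match PySem.Int.ofStr? e with
        | some x => decide (-50 ≤ x ∧ x < 50)
        | none => false
      | _, _ => false
    | _ => false
  else true

def Pre_day8 (s : String) : Prop :=
  ∀ line ∈ PySem.Str.splitlines s, lineOK line = true

instance (s : String) : Decidable (Pre_day8 s) := by unfold Pre_day8; infer_instance

def pvWitness_day8 : String :=
  "rect 3x2\nrotate row y=1 by 10\nrotate column x=1 by 2"

def Spec_day8 (s : String) (out : String) : Prop := out = day8_alt s
instance (s : String) (out : String) : Decidable (Spec_day8 s out) := by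
  unfold Spec_day8; infer_instance

-- ===== CLAIM (what is proved, stated in full; the proofs are below) =====
def Claim_equal_day8 : Prop := ∀ (s : String), Dom_day8 s → Pre_day8 s → Spec_day8 s (day8 s)

-- ===== LEMMAS AND PROOFS =====


-- grid abbreviations for the proofs
def cell (r : List (List Char)) (y x : Nat) : Char := (r.getD y []).getD x ' '

def ShapeG (r : List (List Char)) : Prop :=
  r.length = 6 ∧ ∀ row ∈ r, row.length = 50

-- normalised Nat index of a Python index i into a list of length n
def pyNorm (n : Nat) (i : Int) : Nat := (if i < 0 then i + n else i).toNat

theorem pyIdx?_norm (n : Nat) (i : Int) (h1 : -(n:Int) ≤ i) (h2 : i < n) :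
    PySem.List.pyIdx? n i = some (pyNorm n i) := by
  rcases lt_or_ge i 0 with h | h
  · rw [pyNorm, if_pos h, PySem.List.pyIdx?, if_neg (by omega), if_pos (by omega)]
    congr 1; omega
  · rw [pyNorm, if_neg (by omega), PySem.List.pyIdx?, if_pos (by omega), if_pos (by omega)]

theorem pyNorm_lt (n : Nat) (i : Int) (h1 : -(n:Int) ≤ i) (h2 : i < n) (hn : 0 < n) :
    pyNorm n i < n := by
  simp only [pyNorm]; split_ifs <;> omega

theorem pyGetD_norm {α : Type} (xs : List α) (i : Int) (d : α)
    (h1 : -(xs.length:Int) ≤ i) (h2 : i < xs.length) :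
    PySem.List.pyGetD xs i d = xs.getD (pyNorm xs.length i) d := by
  simp only [PySem.List.pyGetD, PySem.List.pyGet?, pyIdx?_norm xs.length i h1 h2,
    Option.bind_some, List.getD_eq_getElem?_getD]

theorem pySetD_norm {α : Type} (xs : List α) (i : Int) (v : α)
    (h1 : -(xs.length:Int) ≤ i) (h2 : i < xs.length) :
    PySem.List.pySetD xs i v = xs.set (pyNorm xs.length i) v := by
  simp only [PySem.List.pySetD, PySem.List.pySet?, pyIdx?_norm xs.length i h1 h2,
    Option.map_some, Option.getD_some]

theorem grid_ext (r r' : List (List Char)) (hA : ShapeG r) (hB : ShapeG r')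
    (hc : ∀ y < 6, ∀ x < 50, cell r y x = cell r' y x) : r = r' := by
  obtain ⟨h1, h2⟩ := hA
  obtain ⟨h1', h2'⟩ := hB
  apply List.ext_getElem (by omega)
  intro y hy hy'
  apply List.ext_getElem
  · rw [h2 _ (List.getElem_mem _), h2' _ (List.getElem_mem _)]
  intro x hx hx'
  have := hc y (by omega) x (by rw [h2 _ (List.getElem_mem _)] at hx; omega)
  simpa [cell, List.getD_eq_getElem?_getD, List.getElem?_eq_getElem, hy, hy', hx, hx'] using this

-- the column-write loop 'for m in range(c): r[m] = g(m, r[m])' characterised rowwise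
theorem writeFold_spec (g : Int → List Char → List Char) (c : Nat) :
    ∀ (r : List (List Char)), c ≤ r.length →
    (((PySem.List.pyRange 0 (c:Int) 1).foldl
        (fun r m => PySem.List.pySetD r m (g m (PySem.List.pyGetD r m []))) r).length = r.length
    ∧ ∀ (y : Nat) (hy : y < r.length),
      ((PySem.List.pyRange 0 (c:Int) 1).foldl
        (fun r m => PySem.List.pySetD r m (g m (PySem.List.pyGetD r m []))) r)[y]?
        = some (if y < c then g (y:Int) r[y] else r[y])) := by
  induction c with
  | zero =>
    intro r hc
    rw [show ((0:Nat):Int) = 0 from rfl, PySem.List.pyRange_one_eq_nil le_rfl]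
    refine ⟨rfl, fun y hy => ?_⟩
    simp [hy]
  | succ c ih =>
    intro r hc
    obtain ⟨hl, hg⟩ := ih r (by omega)
    rw [show ((c+1:Nat):Int) = (c:Int) + 1 by push_cast; ring,
      PySem.List.pyRange_one_succ_right (by positivity), List.foldl_append, List.foldl_cons,
      List.foldl_nil]
    set WF := (PySem.List.pyRange 0 (c:Int) 1).foldl
      (fun r m => PySem.List.pySetD r m (g m (PySem.List.pyGetD r m []))) r with hWF
    have hcWF : WF.getD c [] = r[c]'(by omega) := by
      rw [List.getD_eq_getElem?_getD, hg c (by omega)]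
      simp
    rw [PySem.List.pyGetD_natCast, PySem.List.pySetD_natCast, hcWF]
    constructor
    · simp [hl]
    · intro y hy
      rw [List.getElem?_set]
      by_cases hyc : c = y
      · subst hyc
        simp [hl, hy]
      · rw [if_neg hyc, hg y hy]
        by_cases hlt : y < c
        · rw [if_pos hlt, if_pos (by omega)]
        · rw [if_neg hlt, if_neg (by omega)]

-- right rotation by slicing = the index comprehension of A
theorem rot_eq (L : Nat) (hL : 0 < L) (row : List Char) (hrow : row.length = L) (v : Int) :
    PySem.List.slice row (some (PySem.Int.mod (-v) (L:Int))) none ++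
      PySem.List.slice row none (some (PySem.Int.mod (-v) (L:Int)))
    = (PySem.List.pyRange 0 (L:Int) 1).map
        (fun n => PySem.List.pyGetD row (PySem.Int.mod (n - v) (L:Int)) ' ') := by
  have hLpos : (0:Int) < (L:Int) := by exact_mod_cast hL
  have hk := PySem.Int.mod_eq_emod_of_pos (a := -v) (b := (L:Int)) hLpos
  have hk0 : 0 ≤ -v % (L:Int) := Int.emod_nonneg _ (by omega)
  have hkL : -v % (L:Int) < (L:Int) := Int.emod_lt_of_pos _ hLpos
  set k0 : Nat := (-v % (L:Int)).toNat with hk0def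
  have hsl : PySem.List.slice row (some (PySem.Int.mod (-v) (L:Int))) none ++
      PySem.List.slice row none (some (PySem.Int.mod (-v) (L:Int)))
      = row.drop k0 ++ row.take k0 := by
    rw [hk, PySem.List.slice_from _ hk0, PySem.List.slice_to _ hk0]
  rw [hsl, PySem.List.pyRange_one]
  apply List.ext_getElem
  · simp [hrow]; omega
  intro n hn hn'
  have hnL : n < L := by simp [hrow] at hn; omega
  have hmod : PySem.Int.mod ((0 + (n:Int)) - v) (L:Int) = ((n:Int) + -v % (L:Int)) % (L:Int) := by
    rw [PySem.Int.mod_eq_emod_of_pos hLpos, show (0 + (n:Int)) - v = (n:Int) + -v from by ring,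
      Int.add_emod]
    conv_rhs => rw [Int.add_emod, Int.emod_emod_of_dvd _ dvd_rfl]
  rw [List.getElem_map, List.getElem_map, List.getElem_range, hmod]
  by_cases hcase : n < L - k0
  · have hidx : ((n:Int) + -v % (L:Int)) % (L:Int) = (n:Int) + -v % (L:Int) :=
      Int.emod_eq_of_lt (by omega) (by push_cast; omega)
    rw [hidx, List.getElem_append_left (by simp [hrow]; omega)]
    rw [PySem.List.pyGetD_eq_getElem row ' ' (by omega) (by rw [hrow]; push_cast; omega)]
    rw [List.getElem_drop]
    congr 1
    push_cast; omega
  · have hidx : ((n:Int) + -v % (L:Int)) % (L:Int) = (n:Int) + -v % (L:Int) - L := by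
      conv_lhs => rw [show (n:Int) + -v % (L:Int) = ((n:Int) + -v % (L:Int) - L) + L * 1 from by ring]
      rw [Int.add_mul_emod_self_left]
      exact Int.emod_eq_of_lt (by omega) (by push_cast; omega)
    rw [hidx, List.getElem_append_right (by simp [hrow]; omega)]
    rw [PySem.List.pyGetD_eq_getElem row ' ' (by omega) (by rw [hrow]; push_cast; omega)]
    rw [List.getElem_take]
    congr 1
    simp [hrow]
    push_cast; omega

theorem filterMap_head_eq (rs : List (List Char)) (h : ∀ row ∈ rs, row ≠ []) :
    rs.filterMap (·.head?) = rs.map (fun row => row.getD 0 ' ') := by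
  induction rs with
  | nil => rfl
  | cons r rest ih =>
    have hr : r ≠ [] := h r (by simp)
    cases r with
    | nil => exact absurd rfl hr
    | cons a l =>
      simp only [List.filterMap_cons, List.head?_cons, List.map_cons, List.getD_cons_zero]
      rw [ih (fun row hrow => h row (by simp [hrow]))]

theorem getD_tail (row : List Char) (i : Nat) :
    row.tail.getD i ' ' = row.getD (i+1) ' ' := by
  rw [List.getD_eq_getElem?_getD, List.getD_eq_getElem?_getD, List.getElem?_tail]

theorem pyZipStar_uniform : ∀ (n : Nat) (rs : List (List Char)), rs ≠ [] →
    (∀ row ∈ rs, row.length = n) →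
    pyZipStar rs = (List.range n).map (fun i => rs.map (fun row => row.getD i ' ')) := by
  intro n
  induction n with
  | zero =>
    intro rs hne hlen
    rw [pyZipStar]
    rw [dif_pos]
    · rfl
    · right
      cases rs with
      | nil => exact absurd rfl hne
      | cons r rest =>
        have : r = [] := List.eq_nil_of_length_eq_zero (hlen r (by simp))
        simp [this]
  | succ n ih =>
    intro rs hne hlen
    have hnonempty : ∀ row ∈ rs, row ≠ [] := by
      intro row hrow h
      have := hlen row hrow
      simp [h] at this
    rw [pyZipStar, dif_neg]
    · rw [filterMap_head_eq rs hnonempty,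
        ih (rs.map (·.tail)) (by simp [hne]) (by
          intro row hrow
          simp only [List.mem_map] at hrow
          obtain ⟨row0, hrow0, rfl⟩ := hrow
          have := hlen row0 hrow0
          simp [List.length_tail, this]),
        List.range_succ_eq_map]
      simp only [List.map_cons, List.map_map]
      congr 1
      apply List.map_congr_left
      intro i _
      simp only [Function.comp]
      apply List.map_congr_left
      intro row _
      exact getD_tail row i
    · intro hcon
      rcases hcon with h | h
      · exact hne h
      · rw [List.any_eq_true] at h
        obtain ⟨row, hrow, hE⟩ := h
        exact hnonempty row hrow (by simpa [List.isEmpty_iff] using hE)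

theorem shapeG_of (r : List (List Char)) (h6 : r.length = 6)
    (h50 : ∀ (y : Nat) (hy : y < r.length), r[y].length = 50) : ShapeG r := by
  refine ⟨h6, fun row hrow => ?_⟩
  obtain ⟨i, hi, rfl⟩ := List.mem_iff_getElem.mp hrow
  exact h50 i hi

theorem cell_eq_of_getElem? (r : List (List Char)) (y : Nat) (row : List Char)
    (h : r[y]? = some row) (x : Nat) : cell r y x = row.getD x ' ' := by
  have hrow : r.getD y [] = row := by rw [List.getD_eq_getElem?_getD, h]; rfl
  rw [cell, hrow]

-- A's rect loop: sets exactly the cells x < a, y < b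
theorem rectA_spec (b : Int) (hb : 0 < b) (hb6 : b ≤ 6) (a : Nat) (ha : a ≤ 50) :
    ∀ (r : List (List Char)), ShapeG r →
    ShapeG ((PySem.List.pyRange 0 (a:Int) 1).foldl (fun r n =>
        (PySem.List.pyRange 0 b 1).foldl (fun r m =>
          PySem.List.pySetD r m (PySem.List.pySetD (PySem.List.pyGetD r m []) n '#')) r) r)
    ∧ ∀ y < 6, ∀ x < 50,
      cell ((PySem.List.pyRange 0 (a:Int) 1).foldl (fun r n =>
        (PySem.List.pyRange 0 b 1).foldl (fun r m =>
          PySem.List.pySetD r m (PySem.List.pySetD (PySem.List.pyGetD r m []) n '#')) r) r) y x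
      = if x < a ∧ (y:Int) < b then '#' else cell r y x := by
  induction a with
  | zero =>
    intro r hr
    rw [show ((0:Nat):Int) = 0 from rfl, PySem.List.pyRange_one_eq_nil le_rfl,
      List.foldl_nil]
    refine ⟨hr, fun y hy x hx => ?_⟩
    rw [if_neg (by omega)]
  | succ a ih =>
    intro r hr
    obtain ⟨hshape, hcell⟩ := ih (by omega) r hr
    rw [show ((a+1:Nat):Int) = (a:Int) + 1 by push_cast; ring,
      PySem.List.pyRange_one_succ_right (by positivity), List.foldl_append, List.foldl_cons,
      List.foldl_nil]
    set R1 := (PySem.List.pyRange 0 (a:Int) 1).foldl (fun r n =>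
        (PySem.List.pyRange 0 b 1).foldl (fun r m =>
          PySem.List.pySetD r m (PySem.List.pySetD (PySem.List.pyGetD r m []) n '#')) r) r
      with hR1
    -- the inner loop over rows m < b, writing column a
    have hbnat : b = ((b.toNat : Nat) : Int) := by omega
    have hwf := writeFold_spec (fun m row => PySem.List.pySetD row (a:Int) '#') b.toNat R1
      (by rw [hshape.1]; omega)
    rw [← hbnat] at hwf
    have hR1len : R1.length = 6 := hshape.1
    have hrowlen : ∀ (y : Nat) (hy : y < R1.length), R1[y].length = 50 := by
      intro y hy
      exact hshape.2 _ (List.getElem_mem _)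
    have hwl : ((PySem.List.pyRange 0 b 1).foldl (fun r m =>
        PySem.List.pySetD r m (PySem.List.pySetD (PySem.List.pyGetD r m []) (a:Int) '#')) R1).length
        = R1.length := hwf.1
    have hwg : ∀ (y : Nat) (hy : y < R1.length),
        ((PySem.List.pyRange 0 b 1).foldl (fun r m =>
          PySem.List.pySetD r m (PySem.List.pySetD (PySem.List.pyGetD r m []) (a:Int) '#')) R1)[y]?
        = some (if y < b.toNat then PySem.List.pySetD R1[y] (a:Int) '#' else R1[y]) := hwf.2
    constructor
    · apply shapeG_of
      · rw [hwl, hR1len]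
      · intro y hy
        have hyR : y < R1.length := by rw [hwl] at hy; exact hy
        have hsome := hwg y hyR
        rw [List.getElem?_eq_getElem hy] at hsome
        rw [Option.some_inj.mp hsome]
        split_ifs
        · rw [PySem.List.pySetD_natCast, List.length_set]
          exact hrowlen y hyR
        · exact hrowlen y hyR
    · intro y hy x hx
      have hyR : y < R1.length := by omega
      have hget := hwg y hyR
      rw [cell_eq_of_getElem? _ y _ hget x]
      by_cases hyb : y < b.toNat
      · rw [if_pos hyb, PySem.List.pySetD_natCast, List.getD_eq_getElem?_getD,
          List.getElem?_set]
        have hy50 : R1[y].length = 50 := hrowlen y hyR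
        by_cases hxa : a = x
        · subst hxa
          rw [if_pos rfl, if_pos (show a < R1[y].length by omega),
            if_pos (show a < a + 1 ∧ (y:Int) < b from ⟨by omega, by omega⟩)]
          rfl
        · rw [if_neg hxa, ← List.getD_eq_getElem?_getD, ← cell_eq_of_getElem? R1 y _
            (List.getElem?_eq_getElem hyR) x, hcell y hy x hx]
          by_cases hxa2 : x < a
          · rw [if_pos ⟨hxa2, by omega⟩, if_pos ⟨by omega, by omega⟩]
          · rw [if_neg (by omega), if_neg (by omega)]
      · rw [if_neg hyb, ← cell_eq_of_getElem? R1 y _ (List.getElem?_eq_getElem hyR) x,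
          hcell y hy x hx, if_neg (by omega), if_neg (by omega)]

theorem mapJoinSingletons (l : List (List Char)) :
    l.map (fun row => PySem.Chars.join [] (row.map (fun c => [c]))) = l := by
  apply List.map_congr_left ?_ |>.trans (List.map_id l)
  intro row _
  exact PySem.Chars.join_nil_singletons row

theorem joinSingletons_map {β : Type} (l : List β) (h : β → Char) :
    PySem.Chars.join [] (l.map (fun xc => [h xc])) = l.map h := by
  have : l.map (fun xc => [h xc]) = (l.map h).map (fun c => [c]) := by
    simp [List.map_map, Function.comp]
  rw [this, PySem.Chars.join_nil_singletons]

-- B's rect comprehension, cellwise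
theorem rectB_spec (r : List (List Char)) (hr : ShapeG r) (a b : Int) :
    ShapeG ((PySem.List.enumerate r 0).map (fun yrow =>
      PySem.Chars.join [] ((PySem.List.enumerate yrow.2 0).map (fun xc =>
        [if xc.1 < a ∧ yrow.1 < b then '#' else xc.2]))))
    ∧ ∀ y < 6, ∀ x < 50,
      cell ((PySem.List.enumerate r 0).map (fun yrow =>
        PySem.Chars.join [] ((PySem.List.enumerate yrow.2 0).map (fun xc =>
          [if xc.1 < a ∧ yrow.1 < b then '#' else xc.2])))) y x
      = if (x:Int) < a ∧ (y:Int) < b then '#' else cell r y x := by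
  have hrow : ∀ (p : Int × List Char),
      PySem.Chars.join [] ((PySem.List.enumerate p.2 0).map (fun xc =>
        [if xc.1 < a ∧ p.1 < b then '#' else xc.2]))
      = (PySem.List.enumerate p.2 0).map (fun xc => if xc.1 < a ∧ p.1 < b then '#' else xc.2) :=
    fun p => joinSingletons_map _ _
  constructor
  · apply shapeG_of
    · simp [PySem.List.length_enumerate, hr.1]
    · intro y hy
      simp only [List.getElem_map, hrow]
      rw [List.length_map, PySem.List.length_enumerate]
      have : y < r.length := by
        simpa [PySem.List.length_enumerate] using hy
      rw [PySem.List.getElem_enumerate]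
      exact hr.2 _ (List.getElem_mem _)
  · intro y hy x hx
    have hyr : y < r.length := by rw [hr.1]; omega
    have hy50 : r[y].length = 50 := hr.2 _ (List.getElem_mem _)
    have hxr : x < (PySem.List.enumerate r[y] 0).length := by
      rw [PySem.List.length_enumerate]; omega
    have hcell : cell ((PySem.List.enumerate r 0).map (fun yrow =>
        PySem.Chars.join [] ((PySem.List.enumerate yrow.2 0).map (fun xc =>
          [if xc.1 < a ∧ yrow.1 < b then '#' else xc.2])))) y x
        = ((PySem.List.enumerate r[y] 0).map
            (fun xc => if xc.1 < a ∧ (0 + (y:Int)) < b then '#' else xc.2)).getD x ' ' := by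
      apply cell_eq_of_getElem?
      rw [List.getElem?_map, PySem.List.getElem?_enumerate,
        List.getElem?_eq_getElem hyr]
      simp only [Option.map_some]
      exact congrArg some (hrow (0 + (y:Int), r[y]))
    rw [hcell, List.getD_eq_getElem?_getD, List.getElem?_map,
      PySem.List.getElem?_enumerate, List.getElem?_eq_getElem (by omega)]
    simp only [Option.map_some, Option.getD_some]
    have hc : ((0:Int) + x < a ∧ (0:Int) + y < b) ↔ ((x:Int) < a ∧ (y:Int) < b) := by omega
    rw [if_congr hc rfl rfl]
    have hcellr : cell r y x = r[y][x]'(by omega) := by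
      rw [cell, show r.getD y [] = r[y] from by
        rw [List.getD_eq_getElem?_getD, List.getElem?_eq_getElem hyr]; rfl,
        List.getD_eq_getElem?_getD, List.getElem?_eq_getElem (by omega)]
      rfl
    rw [hcellr]

theorem getD_map_pyRange' {α : Type} (c : Nat) (f : Int → α) (y : Nat) (hy : y < c) (d : α) :
    (((PySem.List.pyRange 0 (c:Int) 1).map f).getD y d) = f (0 + (y:Int)) := by
  rw [PySem.List.pyRange_one, List.getD_eq_getElem?_getD, List.getElem?_map, List.getElem?_map,
    List.getElem?_range (by omega : y < ((c:Int) - 0).toNat)]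
  rfl

theorem getD_eq_getElem' {α : Type} (l : List α) (y : Nat) (hy : y < l.length) (d : α) :
    l.getD y d = l[y] := by
  rw [List.getD_eq_getElem?_getD, List.getElem?_eq_getElem hy]
  rfl

theorem rowlen_of_shape (r : List (List Char)) (hr : ShapeG r) (y : Nat) (hy : y < r.length) :
    r[y].length = 50 := hr.2 _ (List.getElem_mem _)

theorem getD_row_of_shape (r : List (List Char)) (hr : ShapeG r) (y : Int)
    (hy1 : -6 ≤ y) (hy2 : y < 6) :
    PySem.List.pyGetD r y [] = r[pyNorm 6 y]'(by rw [hr.1]; exact pyNorm_lt 6 y (by omega) (by omega) (by omega)) := by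
  have h1 : -(r.length:Int) ≤ y := by rw [hr.1]; omega
  have h2 : y < (r.length:Int) := by rw [hr.1]; omega
  rw [pyGetD_norm r y [] h1 h2]
  simp only [hr.1]
  exact getD_eq_getElem' _ _ (by rw [hr.1]; exact pyNorm_lt 6 y (by omega) (by omega) (by omega)) _

-- the two row-rotation bodies agree
theorem rowAB (r : List (List Char)) (hr : ShapeG r) (y bv : Int)
    (hy1 : -6 ≤ y) (hy2 : y < 6) :
    PySem.List.pySetD r y ((PySem.List.pyRange 0 50 1).map (fun n =>
      PySem.List.pyGetD (PySem.List.pyGetD r y []) (PySem.Int.mod (n - bv) 50) ' '))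
    = PySem.List.pySetD r y
        (PySem.List.slice (PySem.List.pyGetD r y []) (some (PySem.Int.mod (-bv) 50)) none ++
         PySem.List.slice (PySem.List.pyGetD r y []) none (some (PySem.Int.mod (-bv) 50)))
    ∧ ShapeG (PySem.List.pySetD r y ((PySem.List.pyRange 0 50 1).map (fun n =>
        PySem.List.pyGetD (PySem.List.pyGetD r y []) (PySem.Int.mod (n - bv) 50) ' '))) := by
  have h50 : (PySem.List.pyGetD r y []).length = 50 := by
    rw [getD_row_of_shape r hr y hy1 hy2]
    exact rowlen_of_shape r hr _ _
  have hrot := rot_eq 50 (by norm_num) (PySem.List.pyGetD r y []) h50 bv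
  rw [show (((50:Nat)):Int) = (50:Int) by norm_num] at hrot
  constructor
  · rw [hrot]
  · have hlen : -(r.length:Int) ≤ y ∧ y < (r.length:Int) := by rw [hr.1]; constructor <;> omega
    rw [pySetD_norm r y _ hlen.1 hlen.2]
    refine ⟨by rw [List.length_set]; exact hr.1, ?_⟩
    intro row hrow
    rcases List.mem_or_eq_of_mem_set hrow with h | h
    · exact hr.2 _ h
    · rw [h, List.length_map, PySem.List.length_pyRange_one]
      decide

theorem colAB (r : List (List Char)) (hr : ShapeG r) (x bv : Int)
    (hx1 : -50 ≤ x) (hx2 : x < 50) :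
    ((PySem.List.pyRange 0 6 1).foldl (fun r' y =>
        PySem.List.pySetD r' y (PySem.List.pySetD (PySem.List.pyGetD r' y []) x
          (PySem.List.pyGetD ((PySem.List.pyRange 0 6 1).map (fun yy =>
            PySem.List.pyGetD (PySem.List.pyGetD r (PySem.Int.mod (yy - bv) 6) []) x ' ')) y ' '))) r)
    = (pyZipStar (PySem.List.pySetD ((pyZipStar r).map (fun col =>
          PySem.Chars.join [] (col.map (fun c => [c])))) x
          (PySem.List.slice (PySem.List.pyGetD ((pyZipStar r).map (fun col =>
            PySem.Chars.join [] (col.map (fun c => [c])))) x [])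
            (some (PySem.Int.mod (-bv) 6)) none ++
           PySem.List.slice (PySem.List.pyGetD ((pyZipStar r).map (fun col =>
            PySem.Chars.join [] (col.map (fun c => [c])))) x [])
            none (some (PySem.Int.mod (-bv) 6))))).map (fun row =>
              PySem.Chars.join [] (row.map (fun c => [c])))
    ∧ ShapeG ((PySem.List.pyRange 0 6 1).foldl (fun r' y =>
        PySem.List.pySetD r' y (PySem.List.pySetD (PySem.List.pyGetD r' y []) x
          (PySem.List.pyGetD ((PySem.List.pyRange 0 6 1).map (fun yy =>
            PySem.List.pyGetD (PySem.List.pyGetD r (PySem.Int.mod (yy - bv) 6) []) x ' ')) y ' '))) r) := by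
  have hr6 : r.length = 6 := hr.1
  have hne : r ≠ [] := by intro h; rw [h] at hr6; simp at hr6
  have hzip : pyZipStar r = (List.range 50).map (fun i => r.map (fun row => row.getD i ' ')) :=
    pyZipStar_uniform 50 r hne (fun row h => hr.2 row h)
  rw [mapJoinSingletons (pyZipStar r)]
  -- cols and its rows
  have hcols_len : (pyZipStar r).length = 50 := by rw [hzip]; simp
  have hcol_getD : ∀ (x' : Nat), x' < 50 →
      (pyZipStar r).getD x' [] = r.map (fun row => row.getD x' ' ') := by
    intro x' h
    rw [hzip, List.getD_eq_getElem?_getD, List.getElem?_map, List.getElem?_range (by omega)]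
    rfl
  set nx := pyNorm 50 x with hnxdef
  have hnx : nx < 50 := pyNorm_lt 50 x (by omega) (by omega) (by omega)
  have hcolx : PySem.List.pyGetD (pyZipStar r) x [] = r.map (fun row => row.getD nx ' ') := by
    rw [pyGetD_norm _ x [] (by rw [hcols_len]; omega) (by rw [hcols_len]; omega), hcols_len]
    exact hcol_getD nx hnx
  have hcollen6 : (r.map (fun row => row.getD nx ' ')).length = 6 := by rw [List.length_map, hr6]
  have hrot := rot_eq 6 (by norm_num) (r.map (fun row => row.getD nx ' ')) hcollen6 bv
  rw [show (((6:Nat)):Int) = (6:Int) by norm_num] at hrot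
  -- cols' as a set
  have hsetcols : PySem.List.pySetD (pyZipStar r) x
      (PySem.List.slice (PySem.List.pyGetD (pyZipStar r) x []) (some (PySem.Int.mod (-bv) 6)) none ++
       PySem.List.slice (PySem.List.pyGetD (pyZipStar r) x []) none (some (PySem.Int.mod (-bv) 6)))
      = (pyZipStar r).set nx
        ((PySem.List.pyRange 0 6 1).map (fun yy =>
          PySem.List.pyGetD (r.map (fun row => row.getD nx ' ')) (PySem.Int.mod (yy - bv) 6) ' ')) := by
    rw [pySetD_norm _ x _ (by rw [hcols_len]; omega) (by rw [hcols_len]; omega), hcols_len,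
      hcolx, hrot]
  rw [hsetcols]
  set mrot := (PySem.List.pyRange 0 6 1).map (fun yy =>
    PySem.List.pyGetD (r.map (fun row => row.getD nx ' ')) (PySem.Int.mod (yy - bv) 6) ' ') with hmrotdef
  have hmrotlen : mrot.length = 6 := by
    rw [hmrotdef, List.length_map, PySem.List.length_pyRange_one]; decide
  -- B = transpose of cols'
  have hcols'len : ((pyZipStar r).set nx mrot).length = 50 := by
    rw [List.length_set, hcols_len]
  have hcols'rows : ∀ col ∈ (pyZipStar r).set nx mrot, col.length = 6 := by
    intro col hcol
    rcases List.mem_or_eq_of_mem_set hcol with h | h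
    · rw [hzip] at h
      obtain ⟨i, _, rfl⟩ := List.mem_map.mp h
      rw [List.length_map, hr6]
    · rw [h, hmrotlen]
  have hzip' : pyZipStar ((pyZipStar r).set nx mrot)
      = (List.range 6).map (fun i => ((pyZipStar r).set nx mrot).map (fun col => col.getD i ' ')) :=
    pyZipStar_uniform 6 _ (by intro h; rw [h] at hcols'len; simp at hcols'len) hcols'rows
  rw [hzip', mapJoinSingletons]
  -- A side: the write fold
  have hwf := writeFold_spec (fun m row => PySem.List.pySetD row x
    (PySem.List.pyGetD ((PySem.List.pyRange 0 6 1).map (fun yy =>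
      PySem.List.pyGetD (PySem.List.pyGetD r (PySem.Int.mod (yy - bv) 6) []) x ' ')) m ' ')) 6 r
    (by rw [hr6])
  rw [show (((6:Nat)):Int) = (6:Int) by norm_num] at hwf
  have hwl : ((PySem.List.pyRange 0 6 1).foldl (fun r' y =>
      PySem.List.pySetD r' y (PySem.List.pySetD (PySem.List.pyGetD r' y []) x
        (PySem.List.pyGetD ((PySem.List.pyRange 0 6 1).map (fun yy =>
          PySem.List.pyGetD (PySem.List.pyGetD r (PySem.Int.mod (yy - bv) 6) []) x ' ')) y ' '))) r).length
      = r.length := hwf.1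
  have hwg : ∀ (y : Nat) (hy : y < r.length),
      ((PySem.List.pyRange 0 6 1).foldl (fun r' y =>
        PySem.List.pySetD r' y (PySem.List.pySetD (PySem.List.pyGetD r' y []) x
          (PySem.List.pyGetD ((PySem.List.pyRange 0 6 1).map (fun yy =>
            PySem.List.pyGetD (PySem.List.pyGetD r (PySem.Int.mod (yy - bv) 6) []) x ' ')) y ' '))) r)[y]?
      = some (if y < 6 then
          PySem.List.pySetD r[y] x
            (PySem.List.pyGetD ((PySem.List.pyRange 0 6 1).map (fun yy =>
              PySem.List.pyGetD (PySem.List.pyGetD r (PySem.Int.mod (yy - bv) 6) []) x ' ')) (y:Int) ' ')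
          else r[y]) := hwf.2
  -- row values written by A
  have hval : ∀ (y : Nat), y < 6 →
      PySem.List.pyGetD ((PySem.List.pyRange 0 6 1).map (fun yy =>
        PySem.List.pyGetD (PySem.List.pyGetD r (PySem.Int.mod (yy - bv) 6) []) x ' ')) (y:Int) ' '
      = mrot.getD y ' ' := by
    intro y hy
    have hgR := getD_map_pyRange' 6 (fun yy =>
      PySem.List.pyGetD (PySem.List.pyGetD r (PySem.Int.mod (yy - bv) 6) []) x ' ') y hy ' '
    rw [show (((6:Nat)):Int) = (6:Int) by norm_num] at hgR
    have hgM := getD_map_pyRange' 6 (fun yy =>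
      PySem.List.pyGetD (r.map (fun row => row.getD nx ' ')) (PySem.Int.mod (yy - bv) 6) ' ') y hy ' '
    rw [show (((6:Nat)):Int) = (6:Int) by norm_num] at hgM
    rw [PySem.List.pyGetD_natCast, hgR, hmrotdef, hgM]
    -- both sides: value of column nx in row (0+y-bv) mod 6
    have hm := PySem.Int.mod_eq_emod_of_pos (a := (0 + (y:Int)) - bv) (b := (6:Int)) (by norm_num)
    have hm0 : 0 ≤ ((0 + (y:Int)) - bv) % 6 := Int.emod_nonneg _ (by norm_num)
    have hm6 : ((0 + (y:Int)) - bv) % 6 < 6 := Int.emod_lt_of_pos _ (by norm_num)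
    set m := ((0 + (y:Int)) - bv) % 6 with hmdef
    rw [hm, getD_row_of_shape r hr m (by omega) (by omega)]
    have hym : pyNorm 6 m < 6 := pyNorm_lt 6 m (by omega) (by omega) (by omega)
    have hymr : pyNorm 6 m < r.length := by omega
    have hrow50 : (r[pyNorm 6 m]'(hymr)).length = 50 := rowlen_of_shape r hr _ _
    rw [pyGetD_norm _ x ' ' (by rw [hrow50]; omega) (by rw [hrow50]; omega), hrow50, ← hnxdef]
    -- RHS: getD of the mapped column list
    rw [pyGetD_norm (r.map (fun row => row.getD nx ' ')) m ' '
        (by rw [hcollen6]; omega) (by rw [hcollen6]; omega), hcollen6]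
    conv_rhs => rw [List.getD_eq_getElem?_getD, List.getElem?_map,
      List.getElem?_eq_getElem (show pyNorm 6 m < r.length from hymr)]
    simp only [Option.map_some, Option.getD_some]
  have hshapeA : ShapeG ((PySem.List.pyRange 0 6 1).foldl (fun r' y =>
      PySem.List.pySetD r' y (PySem.List.pySetD (PySem.List.pyGetD r' y []) x
        (PySem.List.pyGetD ((PySem.List.pyRange 0 6 1).map (fun yy =>
          PySem.List.pyGetD (PySem.List.pyGetD r (PySem.Int.mod (yy - bv) 6) []) x ' ')) y ' '))) r) := by
    apply shapeG_of
    · rw [hwl, hr6]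
    · intro y hy
      have hyr : y < r.length := by rw [hwl] at hy; exact hy
      have hsome := hwg y hyr
      rw [List.getElem?_eq_getElem hy] at hsome
      rw [Option.some_inj.mp hsome, if_pos (by omega), hval y (by omega)]
      rw [pySetD_norm _ x _ (by rw [rowlen_of_shape r hr y hyr]; omega)
        (by rw [rowlen_of_shape r hr y hyr]; omega), List.length_set]
      exact rowlen_of_shape r hr y hyr
  have hshapeB : ShapeG ((List.range 6).map (fun i =>
      ((pyZipStar r).set nx mrot).map (fun col => col.getD i ' '))) := by
    apply shapeG_of
    · simp
    · intro y hy
      simp only [List.getElem_map, List.length_map]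
      exact hcols'len
  constructor
  · apply grid_ext _ _ hshapeA hshapeB
    intro y hy x' hx'
    have hyr : y < r.length := by rw [hr6]; omega
    have hrow50 : (r[y]'(hyr)).length = 50 := rowlen_of_shape r hr y hyr
    have hget := hwg y hyr
    have hsetrow : PySem.List.pySetD (r[y]'(hyr)) x (mrot.getD y ' ')
        = (r[y]'(hyr)).set nx (mrot.getD y ' ') := by
      rw [pySetD_norm _ x _ (by rw [hrow50]; omega) (by rw [hrow50]; omega), hrow50, ← hnxdef]
    have hcellA : cell ((PySem.List.pyRange 0 6 1).foldl (fun r' y =>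
        PySem.List.pySetD r' y (PySem.List.pySetD (PySem.List.pyGetD r' y []) x
          (PySem.List.pyGetD ((PySem.List.pyRange 0 6 1).map (fun yy =>
            PySem.List.pyGetD (PySem.List.pyGetD r (PySem.Int.mod (yy - bv) 6) []) x ' ')) y ' '))) r) y x'
        = ((r[y]'(hyr)).set nx (mrot.getD y ' ')).getD x' ' ' := by
      rw [cell_eq_of_getElem? _ y _ hget x', if_pos (by omega), hval y (by omega), hsetrow]
    have hBy : (((List.range 6).map (fun i =>
        ((pyZipStar r).set nx mrot).map (fun col => col.getD i ' ')))[y]?)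
        = some (((pyZipStar r).set nx mrot).map (fun col => col.getD y ' ')) := by
      rw [List.getElem?_map, List.getElem?_range hy]
      rfl
    have hcellB : cell ((List.range 6).map (fun i =>
        ((pyZipStar r).set nx mrot).map (fun col => col.getD i ' '))) y x'
        = ((((pyZipStar r).set nx mrot)[x']'(by rw [hcols'len]; omega)).getD y ' ') := by
      rw [cell_eq_of_getElem? _ y _ hBy x', List.getD_eq_getElem?_getD, List.getElem?_map,
        List.getElem?_eq_getElem (by rw [hcols'len]; omega)]
      rfl
    rw [hcellA, hcellB]
    by_cases hxe : nx = x'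
    · subst hxe
      have h1 : ((r[y]'(hyr)).set nx (mrot.getD y ' ')).getD nx ' ' = mrot.getD y ' ' := by
        rw [List.getD_eq_getElem?_getD, List.getElem?_set, if_pos rfl,
          if_pos (by rw [hrow50]; omega)]
        rfl
      have h2 : (((pyZipStar r).set nx mrot)[nx]'(by rw [hcols'len]; omega)) = mrot := by
        simp only [List.getElem_set]
        simp
      rw [h1, h2]
    · have h1 : ((r[y]'(hyr)).set nx (mrot.getD y ' ')).getD x' ' ' = (r[y]'(hyr)).getD x' ' ' := by
        rw [List.getD_eq_getElem?_getD, List.getElem?_set, if_neg hxe,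
          ← List.getD_eq_getElem?_getD]
      have h2 : (((pyZipStar r).set nx mrot)[x']'(by rw [hcols'len]; omega))
          = r.map (fun row => row.getD x' ' ') := by
        simp only [List.getElem_set, if_neg hxe]
        simp only [hzip, List.getElem_map, List.getElem_range]
      rw [h1, h2]
      conv_rhs => rw [List.getD_eq_getElem?_getD, List.getElem?_map,
        List.getElem?_eq_getElem hyr]
      simp only [Option.map_some, Option.getD_some]
  · exact hshapeA

theorem rectEq (r : List (List Char)) (hr : ShapeG r) (a b : Int)
    (hok : ¬(1 ≤ a ∧ 1 ≤ b ∧ (50 < a ∨ 6 < b))) :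
    ((PySem.List.pyRange 0 a 1).foldl (fun r n =>
        (PySem.List.pyRange 0 b 1).foldl (fun r m =>
          PySem.List.pySetD r m (PySem.List.pySetD (PySem.List.pyGetD r m []) n '#')) r) r)
    = ((PySem.List.enumerate r 0).map (fun yrow =>
        PySem.Chars.join [] ((PySem.List.enumerate yrow.2 0).map (fun xc =>
          [if xc.1 < a ∧ yrow.1 < b then '#' else xc.2]))))
    ∧ ShapeG ((PySem.List.pyRange 0 a 1).foldl (fun r n =>
        (PySem.List.pyRange 0 b 1).foldl (fun r m =>
          PySem.List.pySetD r m (PySem.List.pySetD (PySem.List.pyGetD r m []) n '#')) r) r) := by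
  obtain ⟨hBs, hBc⟩ := rectB_spec r hr a b
  by_cases hb : b ≤ 0
  · have hbn : PySem.List.pyRange 0 b 1 = [] := PySem.List.pyRange_one_eq_nil (by omega)
    simp only [hbn, List.foldl_nil]
    rw [PySem.List.foldl_ignore]
    refine ⟨?_, hr⟩
    apply grid_ext r _ hr hBs
    intro y hy x hx
    rw [hBc y hy x hx, if_neg (by omega)]
  · by_cases ha : a ≤ 0
    · have han : PySem.List.pyRange 0 a 1 = [] := PySem.List.pyRange_one_eq_nil (by omega)
      rw [han, List.foldl_nil]
      refine ⟨?_, hr⟩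
      apply grid_ext r _ hr hBs
      intro y hy x hx
      rw [hBc y hy x hx, if_neg (by omega)]
    · have ha50 : a ≤ 50 := by omega
      have hb6 : b ≤ 6 := by omega
      have hacast : a = ((a.toNat : Nat) : Int) := by omega
      obtain ⟨hAs, hAc⟩ := rectA_spec b (by omega) hb6 a.toNat (by omega) r hr
      refine ⟨?_, ?_⟩
      · conv_lhs => rw [hacast]
        apply grid_ext _ _ hAs hBs
        intro y hy x hx
        rw [hAc y hy x hx, hBc y hy x hx,
          if_congr (show (x < a.toNat ∧ (y:Int) < b) ↔ ((x:Int) < a ∧ (y:Int) < b) by omega) rfl rfl]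
      · rw [hacast]
        exact hAs

theorem bool_of_not_true {b : Bool} (h : ¬ b = true) : b = false := by
  cases b <;> simp_all

theorem step_eq (r : List (List Char)) (hr : ShapeG r) (line : String)
    (hok : lineOK line = true) :
    day8StepA r line = day8AltStep r line ∧ ShapeG (day8StepA r line) := by
  unfold lineOK at hok
  unfold day8StepA day8AltStep day8Parse
  split at hok
  case isTrue h1 =>
    simp only [h1, if_true]
    split at hok
    case h_2 heq => simp at hok
    case h_1 w ab heq =>
      split at hok
      case h_2 heq2 => simp at hok
      case h_1 p q heq2 =>
        split at hok
        case h_2 => simp at hok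
        case h_1 a b heqa heqb =>
          have hok' : ¬(1 ≤ a ∧ 1 ≤ b ∧ (50 < a ∨ 6 < b)) := by
            intro ⟨ha1, hb1, hor⟩
            simp [ha1, hb1] at hok
            omega
          exact rectEq r hr a b hok'
  case isFalse h1 =>
    rw [bool_of_not_true h1]
    simp only [Bool.false_eq_true, if_false]
    split at hok
    case isTrue h2 =>
      simp only [h2, if_true]
      split at hok
      case h_2 heq => simp at hok
      case h_1 w1 w2 p w4 q heq =>
        split at hok
        case h_2 => simp at hok
        case h_1 e bv heqe heqb =>
          split at hok
          case h_2 => simp at hok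
          case h_1 y heqy =>
            have hy := of_decide_eq_true hok
            exact rowAB r hr y bv hy.1 hy.2
    case isFalse h2 =>
      rw [bool_of_not_true h2]
      simp only [Bool.false_eq_true, if_false]
      split at hok
      case isTrue h3 =>
        simp only [h3, if_true]
        split at hok
        case h_2 heq => simp at hok
        case h_1 w1 w2 p w4 q heq =>
          split at hok
          case h_2 => simp at hok
          case h_1 e bv heqe heqb =>
            split at hok
            case h_2 => simp at hok
            case h_1 x heqx =>
              have hx := of_decide_eq_true hok
              exact colAB r hr x bv hx.1 hx.2
      case isFalse h3 =>
        rw [bool_of_not_true h3]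
        simp only [Bool.false_eq_true, if_false]
        exact ⟨by trivial, hr⟩

theorem fold_eq (lines : List String) : ∀ (r : List (List Char)), ShapeG r →
    (∀ l ∈ lines, lineOK l = true) →
    lines.foldl day8StepA r = lines.foldl day8AltStep r
    ∧ ShapeG (lines.foldl day8StepA r) := by
  induction lines with
  | nil => exact fun r hr _ => ⟨rfl, hr⟩
  | cons l ls ih =>
    intro r hr hall
    obtain ⟨he, hs⟩ := step_eq r hr l (hall l (by simp))
    rw [List.foldl_cons, List.foldl_cons, ← he]
    exact ih (day8StepA r l) hs (fun l' hl' => hall l' (by simp [hl']))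

theorem day8_spec' : ∀ (s : String), Pre_day8 s → day8 s = day8_alt s := by
  intro s hpre
  simp only [day8, day8_alt]
  have h0 : (PySem.List.pyRange 0 6 1).map (fun _ =>
      (PySem.List.pyRange 0 50 1).map (fun _ => ' '))
      = List.replicate 6 (List.replicate 50 ' ') := by decide
  have hshape0 : ShapeG (List.replicate 6 (List.replicate 50 ' ')) := by
    refine ⟨by decide, fun row hrow => ?_⟩
    rw [List.eq_of_mem_replicate hrow]
    decide
  obtain ⟨heq, _⟩ := fold_eq (PySem.Str.splitlines s) _ hshape0 hpre
  rw [h0, heq, mapJoinSingletons]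

-- ===== VERDICT (by name: the statement is the Claim_ definition above) =====
theorem day8_spec : Claim_equal_day8 := by
  intro s _hdom hpre
  exact day8_spec' s hpre
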